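-- pv_equiv track=rewrite | github.com/pyiron/sphinx_parser | stinx/toolkit.py | append_item
-- ===== SOURCE A (Python) =====
-- def append_item(group, key, value, n_max=int(1e8)):
--     if key not in group:
--         group[key] = value
--         return group
--     else:
--         for ii in range(n_max):
--             if f"{key}___{ii}" not in group:
--                 group[f"{key}___{ii}"] = value
--                 return group
--     raise ValueError("Too many items in group")
-- ===== SOURCE B (Python) =====
-- def _cand_index(key, k):
--     # Which candidate slot (0 = bare key, i+1 = key___i) does existing key k occupy?
--     if k == key:
--         return 0
--     prefix = key + "___"
--     if k.startswith(prefix):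
--         rest = k[len(prefix):]
--         if rest.isdigit() and str(int(rest)) == rest:
--             return int(rest) + 1
--     return None
--
-- def append_item(group, key, value, n_max=int(1e8)):
--     # One pass over the dict collecting the set of occupied candidate slots,
--     # then take the smallest free slot directly (pigeonhole: it is <= len(group)).
--     used = set(j for k in group if (j := _cand_index(key, k)) is not None)
--     j = next(i for i in range(len(group) + 1) if i not in used)
--     if j > 0 and n_max <= j - 1:
--         raise ValueError("Too many items in group")
--     group[key if j == 0 else f"{key}___{j - 1}"] = value
--     return group
-- ===== Notes on version B (the rewrite author's own statement) =====
-- stated objective: alternative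
-- what changed: A probes candidate keys one by one against the dict (bare key, then key___0, key___1, ...); B instead makes a single parsing pass over the dict that extracts every occupied candidate slot as an integer, then takes the smallest free slot by a mex scan bounded by len(group)+1 and decides the ValueError case arithmetically (n_max <= j-1) instead of by loop exhaustion.
import Mathlib
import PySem

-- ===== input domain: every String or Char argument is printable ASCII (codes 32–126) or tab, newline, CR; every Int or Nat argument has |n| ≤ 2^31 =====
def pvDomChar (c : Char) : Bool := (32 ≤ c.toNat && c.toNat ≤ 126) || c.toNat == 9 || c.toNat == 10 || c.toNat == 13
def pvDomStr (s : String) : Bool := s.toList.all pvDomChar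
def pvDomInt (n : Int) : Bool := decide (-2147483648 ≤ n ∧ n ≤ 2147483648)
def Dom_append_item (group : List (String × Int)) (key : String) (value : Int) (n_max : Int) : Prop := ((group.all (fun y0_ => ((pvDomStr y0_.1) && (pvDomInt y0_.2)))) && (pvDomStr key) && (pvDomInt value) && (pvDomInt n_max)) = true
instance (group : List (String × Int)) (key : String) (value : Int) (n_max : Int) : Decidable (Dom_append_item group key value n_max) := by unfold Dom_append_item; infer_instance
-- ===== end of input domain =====

-- B replaces A's scan of candidate keys (each probed against the dict) by ONE parsing pass
-- over the dict that collects the set of occupied candidate slots as integers, then takes the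
-- smallest free slot directly (bounded by len(group)+1 by pigeonhole) and decides the
-- ValueError case arithmetically. Both Pythons mutate `group` in place identically; the
-- equivalence proved is about the return value.

-- ===== PORT A =====
-- f"{key}___{ii}"
def aSuffix (key : String) (ii : Int) : String := key ++ "___" ++ PySem.Int.toStr ii

-- the `for ii in range(n_max)` loop of A; `none` = falls through to the raise
def appendItemLoop (group : List (String × Int)) (key : String) (value : Int) (n_max ii : Int) :
    Option (List (String × Int)) :=
  if ii < n_max then
    if group.any (fun p => p.1 == aSuffix key ii) then
      appendItemLoop group key value n_max (ii + 1)
    else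
      -- key absent, so dict assignment appends a new entry
      some (group ++ [(aSuffix key ii, value)])
  else none
termination_by (n_max - ii).toNat
decreasing_by simp_wf; omega

def append_item (group : List (String × Int)) (key : String) (value : Int) (n_max : Int) : List (String × Int) :=
  if !(group.any (fun p => p.1 == key)) then group ++ [(key, value)]
  else (appendItemLoop group key value n_max 0).getD group  -- none = ValueError, excluded by Pre_

-- ===== PORT B =====
-- _cand_index(key, k): which candidate slot (0 = bare key, i+1 = key___i) does key k occupy?
def candIndex? (key k : String) : Option Int :=
  if k == key then some 0
  else
    let pre := key ++ "___"
    if PySem.Str.startswith k pre then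
      let rest := PySem.Str.slice k (some (PySem.Str.len pre)) none
      if PySem.Str.strIsdigit rest then
        -- idx = 0; for c in rest: idx = idx * 10 + (ord(c) - 48)
        let idx := rest.toList.foldl (fun a c => a * 10 + ((c.toNat : Int) - 48)) 0
        if PySem.Int.toStr idx == rest then some (idx + 1) else none
      else none
    else none

-- next(i for i in range(bound) if i not in used); the fall-through 0 is Python's
-- StopIteration, unreachable for bound = len(group)+1 (used has at most len(group) elements)
def findFree (used : PySem.Set Int) (bound i : Nat) : Int :=
  if i < bound then
    if used.contains (i : Int) then findFree used bound (i + 1) else (i : Int)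
  else 0
termination_by bound - i

def append_item_alt (group : List (String × Int)) (key : String) (value : Int) (n_max : Int) : List (String × Int) :=
  let used : PySem.Set Int := PySem.Set.ofList (group.filterMap (fun p => candIndex? key p.1))
  let j := findFree used (group.length + 1) 0
  if 0 < j ∧ n_max ≤ j - 1 then group  -- raise ValueError, excluded by Pre_
  else group ++ [((if j == 0 then key else key ++ "___" ++ PySem.Int.toStr (j - 1)), value)]

-- ===== PRECONDITION & SPEC =====
-- Pre_ excludes exactly the inputs on which A raises ValueError: key already present and every
-- candidate key___ii with ii < n_max also present (by pigeonhole the first free suffix index,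
-- when one exists, is at most group.length, so the bounded existential is exact).
def Pre_append_item (group : List (String × Int)) (key : String) (value : Int) (n_max : Int) : Prop :=
  (∀ p ∈ group, p.1 ≠ key) ∨
    ∃ ii ∈ List.range (group.length + 1),
      (ii : Int) < n_max ∧ ∀ p ∈ group, p.1 ≠ key ++ "___" ++ PySem.Int.toStr (ii : Int)
instance (group : List (String × Int)) (key : String) (value : Int) (n_max : Int) : Decidable (Pre_append_item group key value n_max) := by unfold Pre_append_item; infer_instance

def pvWitness_append_item : (List (String × Int)) × String × Int × Int := ([("a", 1), ("b", 2)], "a", 7, 100)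

def Spec_append_item (group : List (String × Int)) (key : String) (value : Int) (n_max : Int) (out : List (String × Int)) : Prop := out = append_item_alt group key value n_max
instance (group : List (String × Int)) (key : String) (value : Int) (n_max : Int) (out : List (String × Int)) : Decidable (Spec_append_item group key value n_max out) := by unfold Spec_append_item; infer_instance

-- ===== CLAIM (what is proved, stated in full; the proofs are below) =====
def Claim_equal_append_item : Prop := ∀ (group : List (String × Int)) (key : String) (value : Int) (n_max : Int), Dom_append_item group key value n_max → Pre_append_item group key value n_max → Spec_append_item group key value n_max (append_item group key value n_max)

-- ===== LEMMAS AND PROOFS =====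

-- the j-th candidate key, as a function of the slot number
def candN (key : String) : Nat → String
  | 0 => key
  | j + 1 => key ++ "___" ++ PySem.Int.toStr (j : Int)

-- "slot j is occupied": its candidate key is a key of the dict
def occupiedB (group : List (String × Int)) (key : String) (j : Nat) : Bool :=
  group.any (fun p => p.1 == candN key j)

theorem digitChar_toNat {d : Nat} (h : d < 10) : (Nat.digitChar d).toNat = 48 + d := by
  interval_cases d <;> rfl

theorem foldl_toDigits_val (n : Nat) :
    (Nat.toDigits 10 n).foldl (fun a c => a * 10 + ((c.toNat : Int) - 48)) 0 = (n : Int) := by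
  induction n using Nat.strong_induction_on with
  | _ n ih =>
    rw [Nat.toDigits_eq_if (by norm_num)]
    by_cases h : n < 10
    · simp [h, List.foldl, digitChar_toNat h]
    · rw [if_neg h, List.foldl_append]
      rw [ih (n / 10) (by omega)]
      simp [List.foldl, digitChar_toNat (Nat.mod_lt n (by norm_num) : n % 10 < 10)]
      omega

theorem strIsdigit_toDigits (n : Nat) :
    PySem.Chars.strIsdigit (Nat.toDigits 10 n) = true := by
  have h1 : 0 < (Nat.toDigits 10 n).length := Nat.length_toDigits_pos
  simp [PySem.Chars.strIsdigit]
  constructor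
  · intro h; simp [h] at h1
  · intro c hc
    have := Nat.isDigit_of_mem_toDigits (by norm_num) (by norm_num) hc
    simp [Char.isDigit] at this
    simp [PySem.Chars.isdigit]
    exact ⟨this.1, this.2⟩

theorem toChars_natCast (j : Nat) : PySem.Int.toChars (j : Int) = Nat.toDigits 10 j := by
  simp [PySem.Int.toChars]

-- toList of the j+1-st candidate

theorem candN_succ_toList (key : String) (j : Nat) :
    (candN key (j + 1)).toList = (key ++ "___").toList ++ Nat.toDigits 10 j := by
  simp [candN, String.toList_append, PySem.Int.toList_toStr, toChars_natCast]

theorem candIndex?_candN (key : String) (j : Nat) :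
    candIndex? key (candN key j) = some (j : Int) := by
  cases j with
  | zero => simp [candIndex?, candN]
  | succ j =>
    have htl : (candN key (j + 1)).toList = (key ++ "___").toList ++ Nat.toDigits 10 j :=
      candN_succ_toList key j
    have hne : (candN key (j + 1) == key) = false := by
      rw [beq_eq_false_iff_ne]
      intro h
      have hlen := congrArg (fun s => s.toList.length) h
      simp [htl, String.toList_append] at hlen
    have hsw : PySem.Str.startswith (candN key (j + 1)) (key ++ "___") = true := by
      rw [PySem.Str.startswith_eq, PySem.Chars.startswith_iff, htl]
      exact List.prefix_append _ _
    have hrest : (PySem.Str.slice (candN key (j + 1)) (some (PySem.Str.len (key ++ "___"))) none).toList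
        = Nat.toDigits 10 j := by
      rw [PySem.Str.toList_slice, PySem.Chars.slice_eq_listSlice, PySem.Str.len_eq,
          PySem.List.slice_from _ (by positivity), htl]
      have h3 : ((((key ++ "___").toList.length : Nat) : Int)).toNat = (key ++ "___").toList.length := by
        omega
      rw [h3, List.drop_left]
    simp only [candIndex?]
    rw [if_neg (by simp [hne]), if_pos hsw,
        if_pos (by rw [PySem.Str.strIsdigit_eq, hrest]; exact strIsdigit_toDigits j),
        if_pos (by
          rw [beq_iff_eq, ← String.toList_inj, PySem.Int.toList_toStr, hrest,
              foldl_toDigits_val, toChars_natCast]),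
        hrest, foldl_toDigits_val]
    norm_num

theorem rest_toList (key k : String) :
    (PySem.Str.slice k (some (PySem.Str.len (key ++ "___"))) none).toList
      = k.toList.drop (key ++ "___").toList.length := by
  rw [PySem.Str.toList_slice, PySem.Chars.slice_eq_listSlice, PySem.Str.len_eq,
      PySem.List.slice_from _ (by positivity)]
  congr 1

theorem foldl_digits_nonneg (cs : List Char) (h : ∀ c ∈ cs, PySem.Chars.isdigit c = true)
    (a : Int) (ha : 0 ≤ a) : 0 ≤ cs.foldl (fun a c => a * 10 + ((c.toNat : Int) - 48)) a := by
  induction cs generalizing a with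
  | nil => simpa
  | cons c cs ih =>
    have hc := h c (by simp)
    simp [PySem.Chars.isdigit] at hc
    have h48 : (48 : Nat) ≤ c.toNat := hc.1
    refine ih (fun c hc => h c (by simp [hc])) _ ?_
    show (0:Int) ≤ a * 10 + ((c.toNat : Int) - 48)
    omega

theorem candIndex?_sound {key k : String} {i : Int} (h : candIndex? key k = some i) :
    ∃ j : Nat, i = (j : Int) ∧ k = candN key j := by
  rw [candIndex?] at h
  by_cases h0 : (k == key) = true
  · rw [if_pos h0] at h
    refine ⟨0, by simpa using h.symm, by simpa [candN] using beq_iff_eq.mp h0⟩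
  · rw [if_neg h0] at h
    simp only [] at h
    by_cases hsw : PySem.Str.startswith k (key ++ "___") = true
    · rw [if_pos hsw] at h
      by_cases hd : PySem.Str.strIsdigit (PySem.Str.slice k (some (PySem.Str.len (key ++ "___"))) none) = true
      · rw [if_pos hd] at h
        by_cases hts : (PySem.Int.toStr ((PySem.Str.slice k (some (PySem.Str.len (key ++ "___"))) none).toList.foldl (fun a c => a * 10 + ((c.toNat : Int) - 48)) 0) == PySem.Str.slice k (some (PySem.Str.len (key ++ "___"))) none) = true
        · rw [if_pos hts] at h
          generalize hrestdef : PySem.Str.slice k (some (PySem.Str.len (key ++ "___"))) none = rest at h hd hts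
          generalize hidxdef : rest.toList.foldl (fun a c => a * 10 + ((c.toNat : Int) - 48)) 0 = idx at h hts
          have hi : i = idx + 1 := by simpa using h.symm
          have hidx0 : 0 ≤ idx := by
            rw [← hidxdef]
            apply foldl_digits_nonneg
            · intro c hc
              rw [PySem.Str.strIsdigit_eq] at hd
              simp [PySem.Chars.strIsdigit] at hd
              exact hd.2 c hc
            · omega
          refine ⟨idx.toNat + 1, by omega, ?_⟩
          have hk : k.toList = (key ++ "___").toList ++ rest.toList := by
            rw [PySem.Str.startswith_eq, PySem.Chars.startswith_iff] at hsw
            obtain ⟨t, ht⟩ := hsw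
            rw [← hrestdef, rest_toList, ← ht, List.drop_left]
          have hrest : rest.toList = PySem.Int.toChars idx := by
            rw [← PySem.Int.toList_toStr, String.toList_inj]
            exact (beq_iff_eq.mp hts).symm
          rw [← String.toList_inj, candN_succ_toList, hk, hrest]
          congr 1
          rw [← toChars_natCast]
          congr 1
          omega
        · rw [if_neg (by simpa using hts)] at h; cases h
      · rw [if_neg (by simpa using hd)] at h; cases h
    · rw [if_neg (by simpa using hsw)] at h; cases h

theorem mem_filterMap_iff_occupied (group : List (String × Int)) (key : String) (j : Nat) :
    ((j : Int) ∈ group.filterMap (fun p => candIndex? key p.1)) ↔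
      occupiedB group key j = true := by
  rw [List.mem_filterMap]
  constructor
  · rintro ⟨p, hp, hc⟩
    obtain ⟨j', hij, hk⟩ := candIndex?_sound hc
    have hjj : j' = j := by omega
    subst hjj
    exact List.any_eq_true.mpr ⟨p, hp, by simp [hk]⟩
  · intro h
    obtain ⟨p, hp, he⟩ := List.any_eq_true.mp h
    exact ⟨p, hp, by rw [beq_iff_eq.mp he]; exact candIndex?_candN key j⟩

theorem exists_free (group : List (String × Int)) (key : String) :
    ∃ j, j ≤ group.length ∧ occupiedB group key j = false := by
  by_contra hno
  push Not at hno
  have hsub : (List.map (fun j : Nat => (j : Int)) (List.range (group.length + 1))) ⊆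
      group.filterMap (fun p => candIndex? key p.1) := by
    intro x hx
    rw [List.mem_map] at hx
    obtain ⟨j, hj, rfl⟩ := hx
    rw [List.mem_range] at hj
    have := hno j (by omega)
    exact (mem_filterMap_iff_occupied _ _ _).mpr (by simpa using this)
  have hnd : (List.map (fun j : Nat => (j : Int)) (List.range (group.length + 1))).Nodup :=
    List.nodup_range.map (fun a b hab => by omega)
  have hle := (hnd.subperm hsub).length_le
  rw [List.length_map, List.length_range] at hle
  have hfm := List.length_filterMap_le (fun p => candIndex? key p.1) group
  omega

theorem aSuffix_eq_candN (key : String) (ii : Nat) : aSuffix key (ii : Int) = candN key (ii + 1) := rfl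

theorem loop_run (group : List (String × Int)) (key : String) (value : Int) (n_max : Int)
    (mm : Nat) (hlt : (mm : Int) < n_max)
    (hocc : ∀ j, j < mm + 1 → occupiedB group key j = true)
    (hfree : occupiedB group key (mm + 1) = false) :
    ∀ k ii : Nat, mm - ii = k → ii ≤ mm →
      appendItemLoop group key value n_max (ii : Int) =
        some (group ++ [(aSuffix key (mm : Int), value)]) := by
  intro k
  induction k with
  | zero =>
    intro ii hk hii
    have hiim : ii = mm := by omega
    subst hiim
    rw [appendItemLoop, if_pos hlt]
    rw [if_neg (by
      have : group.any (fun p => p.1 == aSuffix key (ii : Int)) = false := by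
        rw [aSuffix_eq_candN]; exact hfree
      simp [this])]
  | succ k ih =>
    intro ii hk hii
    have hiim : ii < mm := by omega
    rw [appendItemLoop, if_pos (by omega : (ii : Int) < n_max)]
    rw [if_pos (by rw [aSuffix_eq_candN]; exact hocc (ii + 1) (by omega))]
    have : ((ii : Int) + 1) = ((ii + 1 : Nat) : Int) := by omega
    rw [this]
    exact ih (ii + 1) (by omega) (by omega)

theorem findFree_run (used : PySem.Set Int) (group : List (String × Int)) (key : String)
    (n m : Nat) (hm : m ≤ n)
    (hcont : ∀ j : Nat, used.contains (j : Int) = occupiedB group key j)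
    (hocc : ∀ j, j < m → occupiedB group key j = true)
    (hfree : occupiedB group key m = false) :
    ∀ k i : Nat, m - i = k → i ≤ m → findFree used (n + 1) i = (m : Int) := by
  intro k
  induction k with
  | zero =>
    intro i hk hi
    have him : i = m := by omega
    subst him
    rw [findFree, if_pos (by omega), if_neg (by rw [hcont i, hfree]; simp)]
  | succ k ih =>
    intro i hk hi
    have him : i < m := by omega
    rw [findFree, if_pos (by omega), if_pos (by rw [hcont i]; exact hocc i him)]
    exact ih (i + 1) (by omega) (by omega)

theorem append_item_eq_alt (group : List (String × Int)) (key : String) (value : Int) (n_max : Int)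
    (hpre : Pre_append_item group key value n_max) :
    append_item group key value n_max = append_item_alt group key value n_max := by
  obtain ⟨jw, hjw, hjwfree⟩ := exists_free group key
  have hex : ∃ j, occupiedB group key j = false := ⟨jw, hjwfree⟩
  set m := Nat.find hex with hmdef
  have hmfree : occupiedB group key m = false := Nat.find_spec hex
  have hmle : m ≤ group.length := le_trans (Nat.find_le hjwfree) hjw
  have hocc : ∀ j, j < m → occupiedB group key j = true := by
    intro j hj
    have := Nat.find_min hex hj
    simpa using this
  have hnmax : ∀ mm, m = mm + 1 → (mm : Int) < n_max := by
    intro mm hmm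
    rcases hpre with hfree | ⟨ii, hii, hlt, hfree⟩
    · exfalso
      have h0 : occupiedB group key 0 = true := hocc 0 (by omega)
      obtain ⟨p, hp, he⟩ := List.any_eq_true.mp h0
      exact hfree p hp (by simpa [candN] using beq_iff_eq.mp he)
    · have hfree' : occupiedB group key (ii + 1) = false := by
        rw [occupiedB, List.any_eq_false]
        intro p hp
        simpa [candN] using hfree p hp
      have hle : m ≤ ii + 1 := Nat.find_le hfree'
      omega
  -- A's value
  have hA : append_item group key value n_max = group ++ [(candN key m, value)] := by
    cases hmm : m with
    | zero =>
      have h0 : group.any (fun p => p.1 == key) = false := by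
        have := hmfree
        rw [hmm] at this
        simpa [occupiedB, candN] using this
      simp [append_item, h0, candN]
    | succ mm =>
      have h0 : group.any (fun p => p.1 == key) = true := by
        have := hocc 0 (by omega)
        simpa [occupiedB, candN] using this
      rw [append_item, if_neg (by simp [h0])]
      have hloop := loop_run group key value n_max mm (hnmax mm hmm)
        (fun j hj => hocc j (by omega)) (by rw [← hmm]; exact hmfree)
        mm 0 (by omega) (by omega)
      have h00 : ((0 : Nat) : Int) = (0 : Int) := rfl
      rw [h00] at hloop
      rw [hloop]
      simp [aSuffix_eq_candN]
  -- B's value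
  have hcont : ∀ j : Nat,
      (PySem.Set.ofList (group.filterMap (fun p => candIndex? key p.1))).contains (j : Int)
        = occupiedB group key j := by
    intro j
    cases hov : occupiedB group key j with
    | true =>
      exact (PySem.Set.contains_iff _ _).mpr
        ((PySem.Set.mem_ofList _ _).mpr ((mem_filterMap_iff_occupied _ _ _).mpr hov))
    | false =>
      rw [← Bool.not_eq_true]
      intro hc
      have := (mem_filterMap_iff_occupied group key j).mp
        ((PySem.Set.mem_ofList _ _).mp ((PySem.Set.contains_iff _ _).mp hc))
      rw [hov] at this
      cases this
  have hff : findFree (PySem.Set.ofList (group.filterMap (fun p => candIndex? key p.1)))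
      (group.length + 1) 0 = (m : Int) := by
    have := findFree_run _ group key group.length m hmle hcont hocc hmfree m 0 (by omega) (by omega)
    simpa using this
  rw [hA]
  simp only [append_item_alt, hff]
  cases hmm : m with
  | zero =>
    rw [if_neg (by simp)]
    simp [candN]
  | succ mm =>
    have hn := hnmax mm hmm
    rw [if_neg (by push Not; intro _; push_cast; omega)]
    have hz : (((mm + 1 : Nat) : Int) == 0) = false := by
      rw [beq_eq_false_iff_ne]; push_cast; omega
    rw [hz]
    simp only [Bool.false_eq_true, if_false]
    have : ((mm + 1 : Nat) : Int) - 1 = (mm : Int) := by push_cast; omega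
    rw [this]
    rfl

-- ===== VERDICT (by name: the statement is the Claim_ definition above) =====
theorem append_item_spec : Claim_equal_append_item := by
  intro group key value n_max _ hpre
  unfold Spec_append_item
  exact append_item_eq_alt group key value n_max hpre
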